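-- pv_equiv track=rewrite | github.com/JuanBernaal/universidad | Semestre I/Introducción a la programación/python/practicasTarea7.py | obtenerElementos3Listas
-- ===== SOURCE A (Python) =====
-- def obtenerElementos3Listas(l1, l2, l3):
--     ansSet = set()
--     #Opción 1:
--     for i in l1:
--         for j in l2:
--             if i == j:
--                 ansSet.add("Opción 1")
--     #Opción 2:
--     for i in l1:
--         for j in l3:
--             if i == j:
--                 ansSet.add('Opción 2')
--     #Opción 3:
--     for i in l2:
--         for j in l3:
--             if i == j:
--                 ansSet.add('Opción 3')
--     return ansSet
-- ===== SOURCE B (Python) =====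
-- def obtenerElementos3Listas(l1, l2, l3):
--     tags = {}
--     for x in l1:
--         tags[x] = tags.get(x, set()) | {1}
--     for x in l2:
--         tags[x] = tags.get(x, set()) | {2}
--     for x in l3:
--         tags[x] = tags.get(x, set()) | {3}
--     has12 = False
--     has13 = False
--     has23 = False
--     for t in tags.values():
--         if 1 in t and 2 in t:
--             has12 = True
--         if 1 in t and 3 in t:
--             has13 = True
--         if 2 in t and 3 in t:
--             has23 = True
--     ans = set()
--     if has12:
--         ans.add("Opción 1")
--     if has13:
--         ans.add("Opción 2")
--     if has23:
--         ans.add("Opción 3")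
--     return ans
-- ===== Notes on version B (the rewrite author's own statement) =====
-- stated objective: faster
-- what changed: Replaced A's three quadratic nested membership scans by one pass that indexes each element to the set of lists (1,2,3) it appears in, then a single linear pass over that index setting three pair flags.
import Mathlib
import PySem

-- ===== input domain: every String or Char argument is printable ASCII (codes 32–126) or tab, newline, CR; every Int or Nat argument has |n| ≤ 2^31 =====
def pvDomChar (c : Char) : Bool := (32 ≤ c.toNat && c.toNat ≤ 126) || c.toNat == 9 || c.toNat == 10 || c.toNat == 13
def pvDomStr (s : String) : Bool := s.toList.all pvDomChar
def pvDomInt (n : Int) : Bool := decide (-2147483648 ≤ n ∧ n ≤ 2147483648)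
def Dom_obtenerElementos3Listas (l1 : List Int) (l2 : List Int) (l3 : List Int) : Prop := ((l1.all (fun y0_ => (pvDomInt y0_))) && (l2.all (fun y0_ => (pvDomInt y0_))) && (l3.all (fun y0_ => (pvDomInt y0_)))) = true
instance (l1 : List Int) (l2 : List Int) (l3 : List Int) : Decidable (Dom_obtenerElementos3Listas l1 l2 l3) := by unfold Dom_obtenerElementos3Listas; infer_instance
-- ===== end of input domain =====

-- B replaces A's three quadratic nested scans by a single hash index (element → set of list ids) plus one linear pass over its values; objective: faster.

-- ===== PORT A =====
-- literal transliteration of A: three nested loops, each adding its label to the answer set on a match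
def obtenerElementos3Listas (l1 : List Int) (l2 : List Int) (l3 : List Int) : List String :=
  let s0 : PySem.Set String := PySem.Set.empty
  let s1 := l1.foldl (fun s i => l2.foldl (fun s j => if i == j then PySem.Set.add s "Opción 1" else s) s) s0
  let s2 := l1.foldl (fun s i => l3.foldl (fun s j => if i == j then PySem.Set.add s "Opción 2" else s) s) s1
  l2.foldl (fun s i => l3.foldl (fun s j => if i == j then PySem.Set.add s "Opción 3" else s) s) s2

-- ===== PORT B =====
-- literal transliteration of B: build tags : element → set of list ids, one pass over values sets three flags, then emit labels
def obtenerElementos3Listas_alt (l1 : List Int) (l2 : List Int) (l3 : List Int) : List String :=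
  let d0 : PySem.Dict Int (PySem.Set Int) := PySem.Dict.empty
  let d1 := l1.foldl (fun d x => d.insert x (PySem.Set.union (d.getD x PySem.Set.empty) [1])) d0
  let d2 := l2.foldl (fun d x => d.insert x (PySem.Set.union (d.getD x PySem.Set.empty) [2])) d1
  let d3 := l3.foldl (fun d x => d.insert x (PySem.Set.union (d.getD x PySem.Set.empty) [3])) d2
  let flags := d3.values.foldl (fun (f : Bool × Bool × Bool) t =>
      (f.1 || (PySem.Set.contains t 1 && PySem.Set.contains t 2),
       f.2.1 || (PySem.Set.contains t 1 && PySem.Set.contains t 3),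
       f.2.2 || (PySem.Set.contains t 2 && PySem.Set.contains t 3))) (false, false, false)
  let ans0 : PySem.Set String := PySem.Set.empty
  let ans1 := if flags.1 then PySem.Set.add ans0 "Opción 1" else ans0
  let ans2 := if flags.2.1 then PySem.Set.add ans1 "Opción 2" else ans1
  if flags.2.2 then PySem.Set.add ans2 "Opción 3" else ans2

-- ===== PRECONDITION & SPEC =====
def Spec_obtenerElementos3Listas (l1 : List Int) (l2 : List Int) (l3 : List Int) (out : List String) : Prop := out = obtenerElementos3Listas_alt l1 l2 l3
instance (l1 : List Int) (l2 : List Int) (l3 : List Int) (out : List String) : Decidable (Spec_obtenerElementos3Listas l1 l2 l3 out) := by unfold Spec_obtenerElementos3Listas; infer_instance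

-- ===== CLAIM (what is proved, stated in full; the proofs are below) =====
def Claim_equal_obtenerElementos3Listas : Prop := ∀ (l1 : List Int) (l2 : List Int) (l3 : List Int), Dom_obtenerElementos3Listas l1 l2 l3 → Spec_obtenerElementos3Listas l1 l2 l3 (obtenerElementos3Listas l1 l2 l3)

-- ===== LEMMAS AND PROOFS =====

-- a conditional-add loop over a list adds the element exactly when some item satisfies the test
theorem pv_foldl_addIf {α β : Type} [BEq β] [LawfulBEq β] (p : α → Bool) (c : β) :
    ∀ (l : List α) (s : PySem.Set β),
      l.foldl (fun s y => if p y then PySem.Set.add s c else s) s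
        = if l.any p then PySem.Set.add s c else s := by
  intro l
  induction l with
  | nil => intro s; simp
  | cons y t ih =>
    intro s
    by_cases hp : p y = true
    · simp only [List.foldl_cons, List.any_cons, hp, if_pos, Bool.true_or, if_pos, ih]
      split_ifs with h
      · exact PySem.Set.add_of_mem (by simp [PySem.Set.mem_add])
      · rfl
    · simp [List.foldl_cons, List.any_cons, hp, ih]

-- A's nested double loop is a single conditional add
theorem pv_foldl_addIf2 {β : Type} [BEq β] [LawfulBEq β] (c : β) (la lb : List Int)
    (s : PySem.Set β) :
    la.foldl (fun s i => lb.foldl (fun s j => if i == j then PySem.Set.add s c else s) s) s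
      = if la.any (fun i => lb.any (fun j => i == j)) then PySem.Set.add s c else s := by
  have h : (fun (s : PySem.Set β) i =>
      lb.foldl (fun s j => if i == j then PySem.Set.add s c else s) s)
      = fun s i => if lb.any (fun j => i == j) then PySem.Set.add s c else s := by
    funext s i; exact pv_foldl_addIf (fun j => i == j) c lb s
  rw [h, pv_foldl_addIf (fun i => lb.any (fun j => i == j)) c la s]

-- one dict-building phase: the tag set of x gains k exactly when x ∈ l
theorem pv_getD_phase (k : Int) :
    ∀ (l : List Int) (d : PySem.Dict Int (PySem.Set Int)) (x : Int),
      (l.foldl (fun d x => d.insert x (PySem.Set.union (d.getD x PySem.Set.empty) [k])) d).getD x PySem.Set.empty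
        = if x ∈ l then PySem.Set.add (d.getD x PySem.Set.empty) k else d.getD x PySem.Set.empty := by
  intro l
  induction l with
  | nil => intro d x; simp
  | cons y t ih =>
    intro d x
    simp only [List.foldl_cons, ih]
    by_cases hxy : x = y
    · subst hxy
      have hself : ((d.insert x (PySem.Set.union (d.getD x PySem.Set.empty) [k])).getD x PySem.Set.empty)
          = PySem.Set.add (d.getD x PySem.Set.empty) k := by
        show ((d.insert x (PySem.Set.union (d.getD x PySem.Set.empty) [k])).get? x).getD PySem.Set.empty = _
        rw [PySem.Dict.get?_insert_self]; rfl
      rw [hself]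
      simp only [List.mem_cons, true_or, if_pos]
      split_ifs with h
      · exact PySem.Set.add_of_mem (by simp [PySem.Set.mem_add])
      · rfl
    · have hne : ((d.insert y (PySem.Set.union (d.getD y PySem.Set.empty) [k])).getD x PySem.Set.empty)
          = d.getD x PySem.Set.empty := by
        show ((d.insert y (PySem.Set.union (d.getD y PySem.Set.empty) [k])).get? x).getD PySem.Set.empty = _
        rw [PySem.Dict.get?_insert_of_ne _ _ hxy]; rfl
      rw [hne]
      simp [List.mem_cons, hxy]

-- the pure tag set of an element
def pvTags (l1 l2 l3 : List Int) (x : Int) : PySem.Set Int :=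
  let t1 : PySem.Set Int := if x ∈ l1 then PySem.Set.add PySem.Set.empty 1 else PySem.Set.empty
  let t2 := if x ∈ l2 then PySem.Set.add t1 2 else t1
  if x ∈ l3 then PySem.Set.add t2 3 else t2

theorem pv_mem_tags (l1 l2 l3 : List Int) (x : Int) :
    (1 ∈ pvTags l1 l2 l3 x ↔ x ∈ l1) ∧ (2 ∈ pvTags l1 l2 l3 x ↔ x ∈ l2)
      ∧ (3 ∈ pvTags l1 l2 l3 x ↔ x ∈ l3) := by
  unfold pvTags
  split_ifs <;> simp_all [PySem.Set.empty]

-- the three-flag fold computes three 'any's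
theorem pv_foldl3or {α : Type} (p q r : α → Bool) :
    ∀ (l : List α) (f : Bool × Bool × Bool),
      l.foldl (fun (f : Bool × Bool × Bool) t => (f.1 || p t, f.2.1 || q t, f.2.2 || r t)) f
        = (f.1 || l.any p, f.2.1 || l.any q, f.2.2 || l.any r) := by
  intro l
  induction l with
  | nil => intro f; simp
  | cons y t ih =>
    intro f
    simp [List.foldl_cons, ih, Bool.or_assoc]

theorem obtenerElementos3Listas_agree (l1 l2 l3 : List Int) :
    obtenerElementos3Listas l1 l2 l3 = obtenerElementos3Listas_alt l1 l2 l3 := by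
  -- the three existence booleans
  set e12 := l1.any (fun i => l2.any (fun j => i == j)) with he12
  set e13 := l1.any (fun i => l3.any (fun j => i == j)) with he13
  set e23 := l2.any (fun i => l3.any (fun j => i == j)) with he23
  -- A's side reduces to three conditional adds
  have hA : obtenerElementos3Listas l1 l2 l3 =
      (let s1 := if e12 then PySem.Set.add PySem.Set.empty "Opción 1" else PySem.Set.empty
       let s2 := if e13 then PySem.Set.add s1 "Opción 2" else s1
       if e23 then PySem.Set.add s2 "Opción 3" else s2) := by
    unfold obtenerElementos3Listas
    rw [pv_foldl_addIf2, pv_foldl_addIf2, pv_foldl_addIf2]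
  -- B's dict
  set d3 := l3.foldl (fun d x => d.insert x (PySem.Set.union (d.getD x PySem.Set.empty) [3]))
      (l2.foldl (fun d x => d.insert x (PySem.Set.union (d.getD x PySem.Set.empty) [2]))
        (l1.foldl (fun d x => d.insert x (PySem.Set.union (d.getD x PySem.Set.empty) [1]))
          (PySem.Dict.empty : PySem.Dict Int (PySem.Set Int)))) with hd3
  have hgetD : ∀ x, d3.getD x PySem.Set.empty = pvTags l1 l2 l3 x := by
    intro x
    rw [hd3, pv_getD_phase, pv_getD_phase, pv_getD_phase]
    have hempty : (PySem.Dict.empty : PySem.Dict Int (PySem.Set Int)).getD x PySem.Set.empty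
        = PySem.Set.empty := rfl
    rw [hempty]; rfl
  have hkeysnd : d3.keys.Nodup := by
    rw [hd3]
    refine PySem.Dict.nodup_keys_foldl_insert _ _ _ ?_
    refine PySem.Dict.nodup_keys_foldl_insert _ _ _ ?_
    refine PySem.Dict.nodup_keys_foldl_insert _ _ _ ?_
    simp [PySem.Dict.empty, PySem.Dict.keys]
  have hmemkeys : ∀ x, x ∈ d3.keys ↔ x ∈ l1 ∨ x ∈ l2 ∨ x ∈ l3 := by
    intro x
    rw [hd3, PySem.Dict.keys_foldl_insert, PySem.Dict.keys_foldl_insert, PySem.Dict.keys_foldl_insert]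
    have hke : (PySem.Dict.empty : PySem.Dict Int (PySem.Set Int)).keys = [] := rfl
    rw [hke]
    simp [PySem.Set.mem_update, or_assoc]
  have hvalues : d3.values = d3.keys.map (fun k => d3.getD k PySem.Set.empty) :=
    PySem.Dict.values_eq_map_keys d3 hkeysnd PySem.Set.empty
  -- each flag equals the corresponding existence boolean
  have hflag : ∀ (a b : Int) (la lb : List Int),
      (∀ x, x ∈ la → x ∈ d3.keys) →
      (∀ x, a ∈ pvTags l1 l2 l3 x ↔ x ∈ la) → (∀ x, b ∈ pvTags l1 l2 l3 x ↔ x ∈ lb) →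
      d3.values.any (fun t => PySem.Set.contains t a && PySem.Set.contains t b)
        = la.any (fun i => lb.any (fun j => i == j)) := by
    intro a b la lb hsub hma hmb
    rw [hvalues, List.any_map]
    apply Bool.eq_iff_iff.mpr
    simp only [List.any_eq_true, Function.comp, hgetD, Bool.and_eq_true,
      PySem.Set.contains_eq_listContains, List.contains_iff_mem, hma, hmb, beq_iff_eq]
    constructor
    · rintro ⟨x, _, hx1, hx2⟩
      exact ⟨x, hx1, x, hx2, rfl⟩
    · rintro ⟨i, hi1, j, hj2, rfl⟩
      exact ⟨i, hsub i hi1, hi1, hj2⟩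
  have h12 : d3.values.any (fun t => PySem.Set.contains t 1 && PySem.Set.contains t 2) = e12 := by
    rw [he12]
    refine hflag 1 2 l1 l2 (fun x hx => (hmemkeys x).mpr (Or.inl hx)) (fun x => (pv_mem_tags l1 l2 l3 x).1) (fun x => (pv_mem_tags l1 l2 l3 x).2.1)
  have h13 : d3.values.any (fun t => PySem.Set.contains t 1 && PySem.Set.contains t 3) = e13 := by
    rw [he13]
    refine hflag 1 3 l1 l3 (fun x hx => (hmemkeys x).mpr (Or.inl hx)) (fun x => (pv_mem_tags l1 l2 l3 x).1) (fun x => (pv_mem_tags l1 l2 l3 x).2.2)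
  have h23 : d3.values.any (fun t => PySem.Set.contains t 2 && PySem.Set.contains t 3) = e23 := by
    rw [he23]
    refine hflag 2 3 l2 l3 (fun x hx => (hmemkeys x).mpr (Or.inr (Or.inl hx))) (fun x => (pv_mem_tags l1 l2 l3 x).2.1) (fun x => (pv_mem_tags l1 l2 l3 x).2.2)
  have hB : obtenerElementos3Listas_alt l1 l2 l3 =
      (let s1 := if e12 then PySem.Set.add PySem.Set.empty "Opción 1" else PySem.Set.empty
       let s2 := if e13 then PySem.Set.add s1 "Opción 2" else s1
       if e23 then PySem.Set.add s2 "Opción 3" else s2) := by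
    show (let flags := d3.values.foldl (fun (f : Bool × Bool × Bool) t =>
        (f.1 || (PySem.Set.contains t 1 && PySem.Set.contains t 2),
         f.2.1 || (PySem.Set.contains t 1 && PySem.Set.contains t 3),
         f.2.2 || (PySem.Set.contains t 2 && PySem.Set.contains t 3))) (false, false, false)
      let ans0 : PySem.Set String := PySem.Set.empty
      let ans1 := if flags.1 then PySem.Set.add ans0 "Opción 1" else ans0
      let ans2 := if flags.2.1 then PySem.Set.add ans1 "Opción 2" else ans1
      if flags.2.2 then PySem.Set.add ans2 "Opción 3" else ans2) = _
    rw [pv_foldl3or]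
    simp only [Bool.false_or, h12, h13, h23]
  rw [hA, hB]

-- ===== VERDICT (by name: the statement is the Claim_ definition above) =====
theorem obtenerElementos3Listas_spec : Claim_equal_obtenerElementos3Listas := by
  intro l1 l2 l3 _
  exact obtenerElementos3Listas_agree l1 l2 l3
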